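-- pv_equiv track=rewrite | github.com/iceanimations/preCC | src/_compositing.py | getGoodFiles
-- ===== SOURCE A (Python) =====
-- def getGoodFiles(renders):
--     mid = int(len(renders)/2)
--     if len(renders) % 2 != 0:
--         mid -= 1
--     renders = sorted(renders)
--     yield renders[0]
--     for i, phile in enumerate(renders):
--         if i+1 == mid:
--             yield phile
--             break
--     yield renders[-1]
-- ===== SOURCE B (Python) =====
-- def _select(xs, k):
--     # k-th smallest (0-based) by iterative three-way quickselect
--     while True:
--         p = xs[len(xs) // 2]
--         lt = [x for x in xs if x < p]
--         gt = [x for x in xs if x > p]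
--         nlt = len(lt)
--         neq = len(xs) - nlt - len(gt)
--         if k < nlt:
--             xs = lt
--         elif k < nlt + neq:
--             return p
--         else:
--             k -= nlt + neq
--             xs = gt
--
--
-- def getGoodFiles(renders):
--     n = len(renders)
--     lo = hi = renders[0]
--     for x in renders[1:]:
--         if x < lo:
--             lo = x
--         elif x > hi:
--             hi = x
--     mid = n // 2 - (n % 2)
--     out = [lo]
--     if mid >= 1:
--         out.append(_select(renders, mid - 1))
--     out.append(hi)
--     return out
-- ===== Notes on version B (the rewrite author's own statement) =====
-- stated objective: alternative
-- what changed: B replaces A's full sort with a single running min/max pass plus an iterative three-way quickselect for the one middle order statistic A yields, so no sorted copy of the list is ever built.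
import Mathlib
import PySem

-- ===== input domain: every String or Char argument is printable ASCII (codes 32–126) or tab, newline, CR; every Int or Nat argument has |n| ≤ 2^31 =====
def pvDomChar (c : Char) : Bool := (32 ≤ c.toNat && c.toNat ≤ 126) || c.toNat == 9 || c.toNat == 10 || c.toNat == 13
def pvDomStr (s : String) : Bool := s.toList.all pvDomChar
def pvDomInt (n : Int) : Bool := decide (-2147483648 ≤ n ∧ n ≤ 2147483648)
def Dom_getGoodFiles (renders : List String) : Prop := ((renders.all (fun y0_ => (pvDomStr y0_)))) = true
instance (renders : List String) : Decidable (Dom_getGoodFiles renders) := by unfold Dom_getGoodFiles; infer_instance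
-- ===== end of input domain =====

-- B replaces A's full sort with a one-pass min/max scan plus a three-way quickselect
-- for the single middle order statistic A yields (objective: alternative algorithm;
-- not measurably faster in CPython, where sorted() runs in C).
-- A is a generator; the equivalence is about the list of yielded values.

-- ===== PORT A =====
-- 'for i, phile in enumerate(renders): if i+1 == mid: yield phile; break'
def goAmid : List (Int × String) → Int → List String
  | [], _ => []
  | (i, phile) :: t, mid => if i + 1 = mid then [phile] else goAmid t mid

def getGoodFiles (renders : List String) : List String :=
  let n : Int := renders.length
  -- int(len(renders)/2): exact floor division for lengths in Dom (float 'n/2' is exact there)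
  let mid0 := PySem.Int.floordiv n 2
  let mid := if PySem.Int.mod n 2 ≠ 0 then mid0 - 1 else mid0
  let s := PySem.List.sorted renders (fun x => x) false
  match PySem.List.pyGet? s 0, PySem.List.pyGet? s (-1) with
  | some first, some last => first :: (goAmid (PySem.List.enumerate s 0) mid ++ [last])
  | _, _ => []  -- renders[0] raises IndexError (empty input); excluded by Pre_

-- ===== PORT B =====
-- _select: iterative three-way quickselect from Source B (the while-loop as tail recursion)
def bSelect (xs : List String) (k : Int) : String :=
  match hxs : xs with
  | [] => ""  -- Source B raises here; never reached on the inputs B uses it for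
  | _ :: _ =>
    let p := (PySem.List.pyGet? xs (PySem.Int.floordiv xs.length 2)).getD ""
    let lt := xs.filter (fun x => decide (x < p))
    let gt := xs.filter (fun x => decide (p < x))
    let nlt : Int := lt.length
    let neq : Int := (xs.length : Int) - nlt - gt.length
    if k < nlt then bSelect lt k
    else if k < nlt + neq then p
    else bSelect gt (k - (nlt + neq))
termination_by xs.length
decreasing_by
  all_goals
  · have hp : p ∈ xs := by
      apply PySem.List.mem_of_pyGet?_eq_some xs (i := PySem.Int.floordiv (xs.length : Int) 2)
      have h2 : (0:Int) < 2 := by omega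
      have hlt : ((xs.length : Int) / 2).toNat < xs.length := by
        subst hxs; simp only [List.length_cons]; omega
      simp [p, PySem.Int.floordiv_eq_ediv_of_pos h2,
        PySem.List.pyGet?_of_nonneg _ (show (0:Int) ≤ (xs.length : Int) / 2 by positivity),
        List.getElem?_eq_getElem hlt]
    rw [← hxs]
    calc (List.filter _ xs.attach).unattach.length
        = (List.filter _ xs.attach).length := by rw [List.length_unattach]
      _ < xs.attach.length := List.length_filter_lt_length_iff_exists.2
          ⟨⟨p, hp⟩, List.mem_attach _ _, by intro h; exact absurd (of_decide_eq_true h) (lt_irrefl p)⟩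
      _ = xs.length := List.length_attach

def getGoodFiles_alt (renders : List String) : List String :=
  match renders with
  | [] => []  -- renders[0] raises IndexError in Source B too; excluded by Pre_
  | r0 :: rest =>
    let n : Int := renders.length
    let lohi := rest.foldl
      (fun (s : String × String) x =>
        if x < s.1 then (x, s.2) else if s.2 < x then (s.1, x) else s) (r0, r0)
    let mid := PySem.Int.floordiv n 2 - PySem.Int.mod n 2
    lohi.1 :: ((if 1 ≤ mid then [bSelect renders (mid - 1)] else []) ++ [lohi.2])

-- ===== PRECONDITION & SPEC =====
-- Pre_ excludes only the empty list, on which A (and B) raise IndexError at renders[0].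
def Pre_getGoodFiles (renders : List String) : Prop := renders ≠ []
instance (renders : List String) : Decidable (Pre_getGoodFiles renders) := by unfold Pre_getGoodFiles; infer_instance

def pvWitness_getGoodFiles : List String := ["b", "a"]

def Spec_getGoodFiles (renders : List String) (out : List String) : Prop := out = getGoodFiles_alt renders
instance (renders : List String) (out : List String) : Decidable (Spec_getGoodFiles renders out) := by unfold Spec_getGoodFiles; infer_instance

-- ===== CLAIM (what is proved, stated in full; the proofs are below) =====
def Claim_equal_getGoodFiles : Prop := ∀ (renders : List String), Dom_getGoodFiles renders → Pre_getGoodFiles renders → Spec_getGoodFiles renders (getGoodFiles renders)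

-- ===== LEMMAS AND PROOFS =====

-- A's break-loop over enumerate returns [s[mid-1]] iff st < mid ≤ st + |s|, else [].
theorem goAmid_enum (s : List String) (st mid : Int) :
    goAmid (PySem.List.enumerate s st) mid =
      if st < mid ∧ mid ≤ st + s.length then (s[(mid - 1 - st).toNat]?).toList else [] := by
  induction s generalizing st with
  | nil =>
    simp only [PySem.List.enumerate, goAmid, List.length_nil]
    rw [if_neg]; omega
  | cons x t ih =>
    rw [PySem.List.enumerate_cons]
    simp only [goAmid]
    by_cases hx : st + 1 = mid
    · rw [if_pos hx, if_pos (by simp only [List.length_cons]; omega)]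
      have : (mid - 1 - st).toNat = 0 := by omega
      simp [this]
    · rw [if_neg hx, ih (st + 1)]
      by_cases hc : st + 1 < mid ∧ mid ≤ st + 1 + (t.length : Int)
      · rw [if_pos hc, if_pos (by simp only [List.length_cons]; push_cast; omega)]
        have h1 : (mid - 1 - st).toNat = (mid - 1 - (st + 1)).toNat + 1 := by omega
        rw [h1, List.getElem?_cons_succ]
      · rw [if_neg hc, if_neg (by simp only [List.length_cons]; push_cast; omega)]

-- The running min/max loop of B computes (foldl min, foldl max).
theorem lohi_foldl (t : List String) (lo hi : String) (h : lo ≤ hi) :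
    t.foldl (fun (s : String × String) x =>
        if x < s.1 then (x, s.2) else if s.2 < x then (s.1, x) else s) (lo, hi)
      = (t.foldl min lo, t.foldl max hi) := by
  induction t generalizing lo hi with
  | nil => rfl
  | cons x t ih =>
    simp only [List.foldl_cons]
    by_cases h1 : x < lo
    · rw [if_pos h1, ih x hi (le_trans h1.le h),
        min_eq_right h1.le, max_eq_left (le_trans h1.le h)]
    · rw [if_neg h1]
      by_cases h2 : hi < x
      · rw [if_pos h2, ih lo x (le_trans h h2.le),
          min_eq_left (not_lt.1 h1), max_eq_right h2.le]
      · rw [if_neg h2, ih lo hi h, min_eq_left (not_lt.1 h1), max_eq_left (not_lt.1 h2)]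

-- The head of the sorted list is the running minimum.
theorem sorted_head?_eq_foldl_min (r0 : String) (rest : List String) :
    (PySem.List.sorted (r0 :: rest) (fun x => x) false).head? = some (rest.foldl min r0) := by
  set s := PySem.List.sorted (r0 :: rest) (fun x => x) false with hs
  have hne : s ≠ [] := by
    intro h; have := PySem.List.length_sorted (r0 :: rest) (fun x : String => x) false
    rw [← hs, h] at this; simp at this
  obtain ⟨m, t, hmt⟩ := List.exists_cons_of_ne_nil hne
  have hmin : PySem.List.min? (r0 :: rest) (fun y => y) = some (rest.foldl min r0) :=
    PySem.List.min?_id_cons r0 rest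
  have hm_le : ∀ y ∈ (r0 :: rest), m ≤ y :=
    PySem.List.key_head_sorted_le (r0 :: rest) (fun x => x) hmt
  have hmem : m ∈ (r0 :: rest) := by
    have : m ∈ s := by rw [hmt]; simp
    exact (PySem.List.sorted_perm (r0 :: rest) (fun x : String => x) false).mem_iff.1 this
  have h1 : rest.foldl min r0 ≤ m := PySem.List.min?_isMin hmin m hmem
  have h2 : m ≤ rest.foldl min r0 := hm_le _ (PySem.List.min?_mem hmin)
  rw [hmt]
  simp [le_antisymm h2 h1]

-- The last element of the sorted list is the running maximum.
theorem sorted_getLast?_eq_foldl_max (r0 : String) (rest : List String) :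
    (PySem.List.sorted (r0 :: rest) (fun x => x) false).getLast? = some (rest.foldl max r0) := by
  set s := PySem.List.sorted (r0 :: rest) (fun x => x) false with hs
  have hlen : s.length = rest.length + 1 := by
    rw [hs, PySem.List.length_sorted]; simp
  have hne : s ≠ [] := by intro h; rw [h] at hlen; simp at hlen
  have hM : s.getLast hne ∈ (r0 :: rest) := by
    have : s.getLast hne ∈ s := List.getLast_mem hne
    exact (PySem.List.sorted_perm (r0 :: rest) (fun x : String => x) false).mem_iff.1 this
  have hmax : PySem.List.max? (r0 :: rest) (fun y => y) = some (rest.foldl max r0) :=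
    PySem.List.max?_id_cons r0 rest
  have h1 : s.getLast hne ≤ rest.foldl max r0 := PySem.List.max?_isMax hmax _ hM
  have h2 : rest.foldl max r0 ≤ s.getLast hne := by
    have hm : rest.foldl max r0 ∈ s :=
      (PySem.List.sorted_perm (r0 :: rest) (fun x : String => x) false).mem_iff.2
        (PySem.List.max?_mem hmax)
    obtain ⟨p, hp, hpe⟩ := List.mem_iff_getElem.1 hm
    have hsl : (PySem.List.sorted (r0 :: rest) (fun x : String => x)).length = rest.length + 1 := by
      rw [PySem.List.length_sorted]; simp
    rw [← hpe, List.getLast_eq_getElem hne]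
    exact PySem.List.key_sorted_getElem_mono (r0 :: rest) (fun x => x)
      (p := p) (q := s.length - 1) (by omega) (by omega)
  rw [List.getLast?_eq_some_getLast hne]
  simp [le_antisymm h1 h2]

-- Three-way partition refines the sort: sorted xs = sorted (<p) ++ (=p) ++ sorted (>p).
theorem filter_eq_of_not_lt (xs : List String) (p : String) :
    (xs.filter (fun x => !decide (x < p))).filter (fun x => decide (x = p))
      = xs.filter (fun x => decide (x = p)) := by
  rw [List.filter_filter]
  apply List.filter_congr
  intro x _
  by_cases hxp : x = p <;> simp [hxp]

theorem filter_gt_of_not_lt (xs : List String) (p : String) :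
    (xs.filter (fun x => !decide (x < p))).filter (fun x => !decide (x = p))
      = xs.filter (fun x => decide (p < x)) := by
  rw [List.filter_filter]
  apply List.filter_congr
  intro x _
  rcases lt_trichotomy x p with h | h | h
  · simp [h, lt_asymm h]
  · simp [h]
  · simp [h, ne_of_gt h, lt_asymm h]

theorem sorted_three_way (xs : List String) (p : String) :
    PySem.List.sorted xs (fun x => x) false =
      PySem.List.sorted (xs.filter (fun x => decide (x < p))) (fun x => x) false
        ++ xs.filter (fun x => decide (x = p))
        ++ PySem.List.sorted (xs.filter (fun x => decide (p < x))) (fun x => x) false := by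
  set lt := xs.filter (fun x => decide (x < p)) with hlt
  set eqs := xs.filter (fun x => decide (x = p)) with heqs
  set gt := xs.filter (fun x => decide (p < x)) with hgt
  apply PySem.List.sorted_id_eq_of_perm_of_pairwise
  · -- (sorted lt ++ eqs ++ sorted gt).Perm xs
    have plt := PySem.List.sorted_perm lt (fun x : String => x) false
    have pgt := PySem.List.sorted_perm gt (fun x : String => x) false
    have hEG : (eqs ++ gt).Perm (xs.filter (fun x => !decide (x < p))) := by
      rw [heqs, hgt, ← filter_eq_of_not_lt xs p, ← filter_gt_of_not_lt xs p]
      exact List.filter_append_perm _ _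
    refine List.Perm.trans ((plt.append (List.Perm.refl eqs)).append pgt) ?_
    rw [List.append_assoc]
    refine List.Perm.trans (List.Perm.append_left lt hEG) ?_
    exact List.filter_append_perm _ xs
  · -- Pairwise (· ≤ ·)
    have hA : (PySem.List.sorted lt (fun x => x) false).Pairwise (fun a b : String => a ≤ b) := by
      simpa using PySem.List.sorted_pairwise lt (fun x : String => x)
    have hG : (PySem.List.sorted gt (fun x => x) false).Pairwise (fun a b : String => a ≤ b) := by
      simpa using PySem.List.sorted_pairwise gt (fun x : String => x)
    have hE : eqs.Pairwise (fun a b : String => a ≤ b) := by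
      apply List.pairwise_of_forall_mem_list
      intro a ha b hb
      rw [heqs, List.mem_filter] at ha hb
      have := of_decide_eq_true ha.2
      have := of_decide_eq_true hb.2
      simp_all
    have memA : ∀ a ∈ PySem.List.sorted lt (fun x : String => x) false, a < p := by
      intro a ha
      rw [PySem.List.mem_sorted, hlt, List.mem_filter] at ha
      exact of_decide_eq_true ha.2
    have memE : ∀ a ∈ eqs, a = p := by
      intro a ha
      rw [heqs, List.mem_filter] at ha
      exact of_decide_eq_true ha.2
    have memG : ∀ a ∈ PySem.List.sorted gt (fun x : String => x) false, p < a := by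
      intro a ha
      rw [PySem.List.mem_sorted, hgt, List.mem_filter] at ha
      exact of_decide_eq_true ha.2
    rw [List.pairwise_append, List.pairwise_append]
    refine ⟨⟨hA, hE, ?_⟩, hG, ?_⟩
    · intro a ha b hb
      rw [memE b hb]
      exact (memA a ha).le
    · intro a ha b hb
      rcases List.mem_append.1 ha with ha | ha
      · exact ((memA a ha).trans (memG b hb)).le
      · rw [memE a ha]
        exact (memG b hb).le

-- The pivot picked by bSelect is a member of the (nonempty) list.
theorem bSelect_pivot_mem (x0 : String) (t : List String) :
    ((PySem.List.pyGet? (x0 :: t) (PySem.Int.floordiv ((x0 :: t).length : Int) 2)).getD "")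
      ∈ (x0 :: t) := by
  have h2 : (0:Int) < 2 := by omega
  have hlt : (((x0 :: t).length : Int) / 2).toNat < (x0 :: t).length := by
    simp only [List.length_cons]; omega
  have hg : PySem.List.pyGet? (x0 :: t) (PySem.Int.floordiv (((x0 :: t).length : Int)) 2)
      = some ((x0 :: t)[(((x0 :: t).length : Int) / 2).toNat]'hlt) := by
    rw [PySem.Int.floordiv_eq_ediv_of_pos h2,
      PySem.List.pyGet?_of_nonneg _ (show (0:Int) ≤ ((x0 :: t).length : Int) / 2 by positivity),
      List.getElem?_eq_getElem hlt]
  rw [hg]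
  simpa using List.getElem_mem hlt

-- bSelect computes the k-th element of the sorted list.
theorem bSelect_eq_sorted_aux (n : Nat) : ∀ (xs : List String) (k : Int), xs.length ≤ n →
    0 ≤ k → k < (xs.length : Int) →
    (PySem.List.sorted xs (fun x => x) false)[k.toNat]? = some (bSelect xs k) := by
  induction n with
  | zero =>
    intro xs k hn hk hlen
    omega
  | succ n ih =>
    intro xs k hn hk hlen
    match xs with
    | [] => simp only [List.length_nil, Nat.cast_zero] at hlen; omega
    | x0 :: t =>
      rw [bSelect]
      set pp := ((PySem.List.pyGet? (x0 :: t) (PySem.Int.floordiv ((x0 :: t).length : Int) 2)).getD "") with hpp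
      set L := (x0 :: t).filter (fun x => decide (x < pp)) with hL
      set E := (x0 :: t).filter (fun x => decide (x = pp)) with hE
      set G := (x0 :: t).filter (fun x => decide (pp < x)) with hG
      have hm : pp ∈ (x0 :: t) := bSelect_pivot_mem x0 t
      have hLlt : L.length < (x0 :: t).length := by
        rw [hL]
        exact List.length_filter_lt_length_iff_exists.2
          ⟨pp, hm, by intro hc; exact absurd (of_decide_eq_true hc) (lt_irrefl pp)⟩
      have hGlt : G.length < (x0 :: t).length := by
        rw [hG]
        exact List.length_filter_lt_length_iff_exists.2
          ⟨pp, hm, by intro hc; exact absurd (of_decide_eq_true hc) (lt_irrefl pp)⟩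
      have hperm : (E ++ G).Perm ((x0 :: t).filter (fun x => !decide (x < pp))) := by
        rw [hE, hG, ← filter_eq_of_not_lt _ pp, ← filter_gt_of_not_lt _ pp]
        exact List.filter_append_perm _ _
      have hlen3 : (x0 :: t).length = L.length + E.length + G.length := by
        have h1 := (List.filter_append_perm (fun x => decide (x < pp)) (x0 :: t)).length_eq
        have h2 := hperm.length_eq
        rw [List.length_append] at h1 h2
        rw [← hL] at h1
        omega
      have hS := sorted_three_way (x0 :: t) pp
      rw [← hL, ← hE, ← hG] at hS
      have hsl : (PySem.List.sorted L (fun x : String => x) false).length = L.length :=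
        PySem.List.length_sorted L _ false
      by_cases hb1 : k < (L.length : Int)
      · rw [if_pos hb1]
        have hkL : k.toNat < L.length := by omega
        rw [hS, List.getElem?_append_left (by rw [List.length_append, hsl]; omega),
          List.getElem?_append_left (by rw [hsl]; omega)]
        exact ih L k (by omega) hk (by exact_mod_cast hb1)
      · rw [if_neg hb1]
        by_cases hb2 : k < (L.length : Int) + (((x0 :: t).length : Int) - L.length - G.length)
        · rw [if_pos hb2]
          have hkE : k.toNat - L.length < E.length := by omega
          have hkL : L.length ≤ k.toNat := by omega
          rw [hS, List.getElem?_append_left (by rw [List.length_append, hsl]; omega),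
            List.getElem?_append_right (by rw [hsl]; omega), hsl,
            List.getElem?_eq_getElem hkE]
          have hmemE := List.getElem_mem hkE
          generalize hgen : E[k.toNat - L.length]'hkE = v at hmemE ⊢
          rw [hE, List.mem_filter] at hmemE
          rw [of_decide_eq_true hmemE.2]
        · rw [if_neg hb2]
          have hkR : (PySem.List.sorted L (fun x : String => x) false ++ E).length ≤ k.toNat := by
            rw [List.length_append, hsl]; omega
          rw [hS, List.getElem?_append_right hkR]
          have harg : (k - ((L.length : Int) + (((x0 :: t).length : Int) - L.length - G.length))).toNat
              = k.toNat - (PySem.List.sorted L (fun x : String => x) false ++ E).length := by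
            rw [List.length_append, hsl]; omega
          rw [← harg]
          exact ih G _ (by omega) (by omega) (by push_cast; omega)

theorem bSelect_eq_sorted (xs : List String) (k : Int) (hk : 0 ≤ k)
    (hlen : k < (xs.length : Int)) :
    (PySem.List.sorted xs (fun x => x) false)[k.toNat]? = some (bSelect xs k) :=
  bSelect_eq_sorted_aux xs.length xs k le_rfl hk hlen

theorem getGoodFiles_spec_aux (renders : List String) (h : renders ≠ []) :
    getGoodFiles renders = getGoodFiles_alt renders := by
  obtain ⟨r0, rest, rfl⟩ := List.exists_cons_of_ne_nil h
  have h2 : (0:Int) < 2 := by omega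
  have hhead : PySem.List.pyGet? (PySem.List.sorted (r0 :: rest) (fun x => x) false) 0
      = some (rest.foldl min r0) := by
    rw [PySem.List.pyGet?_zero, ← List.head?_eq_getElem?, sorted_head?_eq_foldl_min]
  have hlast : PySem.List.pyGet? (PySem.List.sorted (r0 :: rest) (fun x => x) false) (-1)
      = some (rest.foldl max r0) := by
    rw [PySem.List.pyGet?_neg_one, sorted_getLast?_eq_foldl_max]
  have hmid : (if PySem.Int.mod ((r0 :: rest).length : Int) 2 ≠ 0
        then PySem.Int.floordiv ((r0 :: rest).length : Int) 2 - 1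
        else PySem.Int.floordiv ((r0 :: rest).length : Int) 2)
      = PySem.Int.floordiv ((r0 :: rest).length : Int) 2
          - PySem.Int.mod ((r0 :: rest).length : Int) 2 := by
    rw [PySem.Int.floordiv_eq_ediv_of_pos h2, PySem.Int.mod_eq_emod_of_pos h2]
    simp only [List.length_cons]
    push_cast
    split_ifs with hif <;> omega
  simp only [getGoodFiles, getGoodFiles_alt, hhead, hlast, hmid,
    lohi_foldl rest r0 r0 le_rfl]
  congr 1
  congr 1
  rw [goAmid_enum]
  set mid := PySem.Int.floordiv ((r0 :: rest).length : Int) 2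
      - PySem.Int.mod ((r0 :: rest).length : Int) 2 with hmid'
  have hb : PySem.Int.floordiv ((r0 :: rest).length : Int) 2 = ((r0 :: rest).length : Int) / 2 :=
    PySem.Int.floordiv_eq_ediv_of_pos h2
  have hbm : PySem.Int.mod ((r0 :: rest).length : Int) 2 = ((r0 :: rest).length : Int) % 2 :=
    PySem.Int.mod_eq_emod_of_pos h2
  have hsl : (PySem.List.sorted (r0 :: rest) (fun x : String => x) false).length
      = (r0 :: rest).length := PySem.List.length_sorted _ _ _
  by_cases hc : 1 ≤ mid
  · rw [if_pos ?side]
    case side =>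
      constructor
      · omega
      · rw [hsl, hmid', hb, hbm]
        simp only [List.length_cons]
        push_cast
        omega
    rw [if_pos hc]
    have hsel := bSelect_eq_sorted (r0 :: rest) (mid - 1) (by omega)
      (by rw [hmid', hb, hbm]; simp only [List.length_cons]; push_cast; omega)
    have : mid - 1 - 0 = mid - 1 := by omega
    rw [this, hsel]
    rfl
  · rw [if_neg ?nside, if_neg hc]
    case nside =>
      intro hcon
      exact hc (by omega)

-- ===== VERDICT (by name: the statement is the Claim_ definition above) =====
theorem getGoodFiles_spec : Claim_equal_getGoodFiles := by
  intro renders _ hpre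
  unfold Spec_getGoodFiles
  exact getGoodFiles_spec_aux renders hpre
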